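-- pv_equiv track=rewrite | github.com/openmpy/ps | Python3/프로그래머스/1/160586. 대충 만든 자판/대충 만든 자판.py | solution
-- ===== SOURCE A (Python) =====
-- def solution(keymap, targets):
--     ctx = {}
--
--     for key in keymap:
--         for c in key:
--             if ctx.get(c) == None:
--                 ctx[c] = key.index(c) + 1
--             else:
--                 ctx[c] = min(key.index(c) + 1, ctx[c])
--
--     answer = []
--
--     for target in targets:
--         s = 0
--
--         for t in target:
--             if ctx.get(t) != None:
--                 s += ctx[t]
--             else:
--                 s = -1
--                 break
--
--         answer.append(s)
--
--     return answer
-- ===== SOURCE B (Python) =====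
-- def solution(keymap, targets):
--     def score(target):
--         s = 0
--         for t in target:
--             positions = [key.index(t) + 1 for key in keymap if t in key]
--             if not positions:
--                 return -1
--             s += min(positions)
--         return s
--     return [score(target) for target in targets]
-- ===== Notes on version B (the rewrite author's own statement) =====
-- stated objective: alternative
-- what changed: B drops A's precomputed char->min-position dict entirely and instead, per target character, scans all keymaps fresh for its positions and takes their min (query-time scanning instead of an index table), returning results via a comprehension.
import Mathlib
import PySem

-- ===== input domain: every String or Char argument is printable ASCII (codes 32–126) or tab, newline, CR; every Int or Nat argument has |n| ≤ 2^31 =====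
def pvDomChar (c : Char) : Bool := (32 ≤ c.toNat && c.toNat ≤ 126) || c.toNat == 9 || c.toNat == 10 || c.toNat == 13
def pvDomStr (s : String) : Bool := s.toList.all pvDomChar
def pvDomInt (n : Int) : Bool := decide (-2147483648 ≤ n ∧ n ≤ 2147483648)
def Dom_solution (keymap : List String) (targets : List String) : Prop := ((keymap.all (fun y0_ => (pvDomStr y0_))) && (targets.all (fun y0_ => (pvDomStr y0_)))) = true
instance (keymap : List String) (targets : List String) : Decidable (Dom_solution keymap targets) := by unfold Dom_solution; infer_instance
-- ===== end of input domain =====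

-- B drops A's precomputed char→min-position dict and scans all keymaps fresh per target character (alternative decomposition, similar cost).


-- ===== PORT A =====
-- key.index(c) + 1 for a character c known to occur in key (exact on the reachable path: c is drawn from key)
def pvIdx1 (key : List Char) (c : Char) : Int := ((PySem.List.index? key c).getD 0 : Int) + 1

-- the 'for key in keymap: for c in key: …' dict-building loop
def pvBuildCtx (keymap : List String) : PySem.Dict Char Int :=
  keymap.foldl (fun ctx key =>
    key.toList.foldl (fun ctx c =>
      match ctx.get? c with
      | none => ctx.insert c (pvIdx1 key.toList c)
      | some v => ctx.insert c (min (pvIdx1 key.toList c) v)) ctx) PySem.Dict.empty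

-- the inner 'for t in target' loop with its break-to-(-1)
def pvALoop (ctx : PySem.Dict Char Int) : List Char → Int → Int
  | [], s => s
  | t :: rest, s =>
    match ctx.get? t with
    | some v => pvALoop ctx rest (s + v)
    | none => -1

def solution (keymap : List String) (targets : List String) : List Int :=
  let ctx := pvBuildCtx keymap
  targets.foldl (fun answer target => answer ++ [pvALoop ctx target.toList 0]) []

-- ===== PORT B =====
-- [key.index(t) + 1 for key in keymap if t in key]  ('t in key' for a single char t = list membership, exact)
def pvPositions (keymap : List String) (t : Char) : List Int :=
  (keymap.filter (fun key => key.toList.contains t)).map (fun key => pvIdx1 key.toList t)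

-- def score(target): early 'return -1' on the first char with no positions
def pvScore (keymap : List String) : List Char → Int → Int
  | [], s => s
  | t :: rest, s =>
    match PySem.List.min? (pvPositions keymap t) (fun x => x) with
    | none => -1
    | some m => pvScore keymap rest (s + m)

def solution_alt (keymap : List String) (targets : List String) : List Int :=
  targets.map (fun target => pvScore keymap target.toList 0)

-- ===== PRECONDITION & SPEC =====
def Spec_solution (keymap : List String) (targets : List String) (out : List Int) : Prop := out = solution_alt keymap targets
instance (keymap : List String) (targets : List String) (out : List Int) : Decidable (Spec_solution keymap targets out) := by unfold Spec_solution; infer_instance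

-- ===== CLAIM (what is proved, stated in full; the proofs are below) =====
def Claim_equal_solution : Prop := ∀ (keymap : List String) (targets : List String), Dom_solution keymap targets → Spec_solution keymap targets (solution keymap targets)

-- ===== LEMMAS AND PROOFS =====

-- 'min of p against an optional accumulator'
def pvMM (p : Int) : Option Int → Int
  | none => p
  | some v => min p v

theorem pvMM_absorb (p : Int) (o : Option Int) : pvMM p (some (pvMM p o)) = pvMM p o := by
  cases o with
  | none => simp [pvMM]
  | some v => show min p (min p v) = min p v; rw [← min_assoc, min_self]

-- one inner step of A's dict loop, seen through get?
theorem pvStep_get (key : List Char) (ctx : PySem.Dict Char Int) (c a : Char) :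
    ((match ctx.get? c with
      | none => ctx.insert c (pvIdx1 key c)
      | some v => ctx.insert c (min (pvIdx1 key c) v)).get? a)
      = if a = c then some (pvMM (pvIdx1 key c) (ctx.get? c)) else ctx.get? a := by
  cases h : ctx.get? c <;> simp [PySem.Dict.get?_insert, pvMM]

-- A's inner fold over the characters of one key, characterised pointwise
theorem pvInner_get (key : List Char) (cs : List Char) (ctx : PySem.Dict Char Int) (a : Char) :
    ((cs.foldl (fun ctx c =>
        match ctx.get? c with
        | none => ctx.insert c (pvIdx1 key c)
        | some v => ctx.insert c (min (pvIdx1 key c) v)) ctx).get? a)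
      = if a ∈ cs then some (pvMM (pvIdx1 key a) (ctx.get? a)) else ctx.get? a := by
  induction cs generalizing ctx with
  | nil => simp
  | cons c cs ih =>
    simp only [List.foldl_cons, ih, pvStep_get key ctx c a, List.mem_cons]
    by_cases hac : a = c
    · subst hac
      by_cases hm : a ∈ cs <;> simp [hm, pvMM_absorb]
    · by_cases hm : a ∈ cs <;> simp [hac, hm]

-- A's whole ctx, characterised pointwise as a fold over keymap
theorem pvCtx_get (keys : List String) (d : PySem.Dict Char Int) (a : Char) :
    ((keys.foldl (fun ctx key =>
        key.toList.foldl (fun ctx c =>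
          match ctx.get? c with
          | none => ctx.insert c (pvIdx1 key.toList c)
          | some v => ctx.insert c (min (pvIdx1 key.toList c) v)) ctx) d).get? a)
      = keys.foldl (fun acc key =>
          if a ∈ key.toList then some (pvMM (pvIdx1 key.toList a) acc) else acc) (d.get? a) := by
  induction keys generalizing d with
  | nil => rfl
  | cons key keys ih => simp only [List.foldl_cons, ih, pvInner_get]

-- B's positions list folded the same way
theorem pvPositions_fold (keys : List String) (t : Char) (acc : Option Int) :
    (pvPositions keys t).foldl (fun a x => some (pvMM x a)) acc
      = keys.foldl (fun acc key =>
          if t ∈ key.toList then some (pvMM (pvIdx1 key.toList t) acc) else acc) acc := by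
  induction keys generalizing acc with
  | nil => rfl
  | cons key keys ih =>
    by_cases h : t ∈ key.toList
    · have hp : pvPositions (key :: keys) t = pvIdx1 key.toList t :: pvPositions keys t := by
        simp [pvPositions, h]
      rw [hp, List.foldl_cons, List.foldl_cons, if_pos h]
      exact ih _
    · have hp : pvPositions (key :: keys) t = pvPositions keys t := by
        simp [pvPositions, h]
      rw [hp, List.foldl_cons, if_neg h]
      exact ih acc

theorem pvFoldMM_some (l : List Int) (x : Int) :
    l.foldl (fun a y => some (pvMM y a)) (some x) = some (l.foldl min x) := by
  induction l generalizing x with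
  | nil => rfl
  | cons y l ih =>
    rw [List.foldl_cons, List.foldl_cons]
    have hstep : pvMM y (some x) = min y x := rfl
    rw [hstep, ih, min_comm y x]

theorem pvMin?_eq_fold (l : List Int) :
    PySem.List.min? l (fun x => x) = l.foldl (fun a y => some (pvMM y a)) none := by
  cases l with
  | nil => rfl
  | cons x l => rw [PySem.List.min?_id_cons, List.foldl_cons, pvFoldMM_some]; rfl

-- the pointwise bridge: A's dict lookup = B's fresh scan
theorem pvLookup_eq (keymap : List String) (t : Char) :
    (pvBuildCtx keymap).get? t = PySem.List.min? (pvPositions keymap t) (fun x => x) := by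
  rw [pvBuildCtx, pvCtx_get, pvMin?_eq_fold, pvPositions_fold]
  rfl

theorem pvLoop_eq (keymap : List String) (ts : List Char) (s : Int) :
    pvALoop (pvBuildCtx keymap) ts s = pvScore keymap ts s := by
  induction ts generalizing s with
  | nil => rfl
  | cons t rest ih =>
    simp only [pvALoop, pvScore, pvLookup_eq keymap t]
    cases PySem.List.min? (pvPositions keymap t) (fun x => x) <;> simp [ih]

-- ===== VERDICT (by name: the statement is the Claim_ definition above) =====
theorem solution_spec : Claim_equal_solution := by
  intro keymap targets _
  unfold Spec_solution solution solution_alt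
  rw [PySem.List.foldl_append_singleton_eq_map]
  simp only [List.nil_append]
  exact List.map_congr_left (fun target _ => pvLoop_eq keymap target.toList 0)
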